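-- pv_equiv track=rewrite | github.com/AP-MI-2021/lab-2-AlecsandraMuha | main.py | is_antipalindrome
-- ===== SOURCE A (Python) =====
-- def is_antipalindrome(n):
--     '''
--     Determina daca un numar dat n este antipalindrom
--     :param n:numarul dat
--     :return: True daca n este antipalindrom si False in cazul in care n nu este antipalindrom
--     '''
--
--     nrc = 0
--     x = n
--     while x!= 0:
--         nrc= nrc + 1
--         x = x// 10
--     x = n
--     inv = 0
--     while x != 0:
--         inv = inv * 10 + x % 10
--         x = x // 10
--     i = nrc // 2
--     while i != 0:
--         if n % 10 == inv % 10: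
--             return False
--         i = i - 1
--         n = n // 10
--         inv = inv // 10
--     return True
-- ===== SOURCE B (Python) =====
-- def is_antipalindrome(n):
--     digits = []
--     x = n
--     while x != 0:
--         digits.append(x % 10)
--         x = x // 10
--     lo = 0
--     hi = len(digits) - 1
--     while lo < hi:
--         if digits[lo] == digits[hi]:
--             return False
--         lo = lo + 1
--         hi = hi - 1
--     return True
-- ===== Notes on version B (the rewrite author's own statement) =====
-- stated objective: simpler
-- what changed: B extracts the digits once into a list and checks opposite positions with two inward-moving indices, instead of A's three arithmetic loops (digit count, reversal, paired modulo walk).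
import Mathlib
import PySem

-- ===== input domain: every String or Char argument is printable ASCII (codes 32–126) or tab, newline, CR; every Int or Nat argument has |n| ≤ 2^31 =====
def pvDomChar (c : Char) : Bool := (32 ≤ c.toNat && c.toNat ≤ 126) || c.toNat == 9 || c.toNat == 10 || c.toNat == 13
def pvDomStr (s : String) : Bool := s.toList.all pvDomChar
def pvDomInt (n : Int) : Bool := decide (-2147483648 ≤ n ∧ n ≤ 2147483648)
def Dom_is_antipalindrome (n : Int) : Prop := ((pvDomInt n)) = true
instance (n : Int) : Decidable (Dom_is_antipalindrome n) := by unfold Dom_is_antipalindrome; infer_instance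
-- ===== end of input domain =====

-- B replaces A's three arithmetic loops by one digit-extraction pass into a list plus a
-- two-pointer inward scan (objective: simpler). Pre_ excludes negative n, where the Python
-- A (and B) loop forever.


-- termination helper for the digit loops (cited in decreasing_by)
theorem pvDiv10_toNat_lt (x : Int) (h : ¬ x ≤ 0) :
    (PySem.Int.floordiv x 10).toNat < x.toNat := by
  rw [PySem.Int.floordiv_eq_ediv_of_pos (by omega)]
  omega

-- ===== PORT A =====
-- first loop: nrc counting
def pvDigCount (x : Int) : Int :=
  if h : x ≤ 0 then 0
  else pvDigCount (PySem.Int.floordiv x 10) + 1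
termination_by x.toNat
decreasing_by exact pvDiv10_toNat_lt x h

-- second loop: building inv
def pvRevLoop (x inv : Int) : Int :=
  if h : x ≤ 0 then inv
  else pvRevLoop (PySem.Int.floordiv x 10) (inv * 10 + PySem.Int.mod x 10)
termination_by x.toNat
decreasing_by exact pvDiv10_toNat_lt x h

-- third loop: paired comparison (loop guards use `≤ 0` for totality; Python's `!= 0`
-- coincides on the nonnegative values these loops see under Pre_)
def pvCmpLoop (i n inv : Int) : Bool :=
  if i ≤ 0 then true
  else if PySem.Int.mod n 10 = PySem.Int.mod inv 10 then false
  else pvCmpLoop (i - 1) (PySem.Int.floordiv n 10) (PySem.Int.floordiv inv 10)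
termination_by i.toNat
decreasing_by omega

def is_antipalindrome (n : Int) : Bool :=
  pvCmpLoop (PySem.Int.floordiv (pvDigCount n) 2) n (pvRevLoop n 0)

-- ===== PORT B =====
-- digit-extraction loop of Source B
def pvDigits (x : Int) : List Int :=
  if h : x ≤ 0 then []
  else PySem.Int.mod x 10 :: pvDigits (PySem.Int.floordiv x 10)
termination_by x.toNat
decreasing_by exact pvDiv10_toNat_lt x h

-- two-pointer loop of Source B
def pvTwoPtr (ds : List Int) (lo hi : Int) : Bool :=
  if hi ≤ lo then true
  else if (PySem.List.pyGet? ds lo).getD 0 = (PySem.List.pyGet? ds hi).getD 0 then false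
  else pvTwoPtr ds (lo + 1) (hi - 1)
termination_by (hi - lo).toNat
decreasing_by omega

def is_antipalindrome_alt (n : Int) : Bool :=
  let ds := pvDigits n
  pvTwoPtr ds 0 ((ds.length : Int) - 1)

-- ===== PRECONDITION & SPEC =====
-- Pre_ excludes n < 0: there both Pythons' `while x != 0: x = x // 10` loops never terminate.
def Pre_is_antipalindrome (n : Int) : Prop := 0 ≤ n
instance (n : Int) : Decidable (Pre_is_antipalindrome n) := by unfold Pre_is_antipalindrome; infer_instance
def pvWitness_is_antipalindrome : Int := (121)

def Spec_is_antipalindrome (n : Int) (out : Bool) : Prop := out = is_antipalindrome_alt n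
instance (n : Int) (out : Bool) : Decidable (Spec_is_antipalindrome n out) := by unfold Spec_is_antipalindrome; infer_instance

-- ===== CLAIM (what is proved, stated in full; the proofs are below) =====
def Claim_equal_is_antipalindrome : Prop := ∀ (n : Int), Dom_is_antipalindrome n → Pre_is_antipalindrome n → Spec_is_antipalindrome n (is_antipalindrome n)

-- ===== LEMMAS AND PROOFS =====

-- little-endian value of a digit list
def pvVal (L : List Int) : Int := L.foldr (fun d acc => d + 10 * acc) 0

def pvGood (L : List Int) : Prop := ∀ d ∈ L, 0 ≤ d ∧ d < 10

-- common recursive form of both half-comparisons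
def pvZc : Nat → List Int → List Int → Bool
  | 0, _, _ => true
  | m + 1, P, Q => if P.headD 0 = Q.headD 0 then false else pvZc m P.tail Q.tail

theorem pvVal_cons (d : Int) (L : List Int) : pvVal (d :: L) = d + 10 * pvVal L := rfl

theorem pvVal_nonneg (L : List Int) (h : pvGood L) : 0 ≤ pvVal L := by
  induction L with
  | nil => simp [pvVal]
  | cons d L ih =>
      have hd := h d (by simp)
      have := ih (fun x hx => h x (by simp [hx]))
      rw [pvVal_cons]; omega

theorem pvVal_mod (L : List Int) (h : pvGood L) :
    PySem.Int.mod (pvVal L) 10 = L.headD 0 := by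
  cases L with
  | nil => simp [pvVal, PySem.Int.mod]
  | cons d L =>
      have hd := h d (by simp)
      have hnn := pvVal_nonneg L (fun x hx => h x (by simp [hx]))
      rw [pvVal_cons, PySem.Int.mod_eq_emod_of_pos (by omega)]
      simp only [List.headD_cons]
      omega

theorem pvVal_div (L : List Int) (h : pvGood L) :
    PySem.Int.floordiv (pvVal L) 10 = pvVal L.tail := by
  cases L with
  | nil => simp [pvVal, PySem.Int.floordiv]
  | cons d L =>
      have hd := h d (by simp)
      have hnn := pvVal_nonneg L (fun x hx => h x (by simp [hx]))
      rw [pvVal_cons, PySem.Int.floordiv_eq_ediv_of_pos (by omega)]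
      simp only [List.tail_cons]
      omega

theorem pvVal_append_single (L : List Int) (d : Int) :
    pvVal (L ++ [d]) = pvVal L + d * 10 ^ L.length := by
  induction L with
  | nil => simp [pvVal]
  | cons e L ih =>
      simp only [List.cons_append, pvVal_cons, ih, List.length_cons]
      ring

theorem pvGood_digits (x : Int) : pvGood (pvDigits x) := by
  fun_induction pvDigits x with
  | case1 x h => simp [pvGood]
  | case2 x h ih =>
      intro d hd
      rcases List.mem_cons.mp hd with h1 | h2
      · subst h1
        exact ⟨PySem.Int.mod_nonneg _ (by omega), PySem.Int.mod_lt _ (by omega)⟩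
      · exact ih d h2

theorem pvVal_digits (x : Int) (hx : 0 ≤ x) : pvVal (pvDigits x) = x := by
  fun_induction pvDigits x with
  | case1 x h => simp [pvVal]; omega
  | case2 x h ih =>
      rw [pvVal_cons, ih (by
        rw [PySem.Int.floordiv_eq_ediv_of_pos (by omega)]; omega)]
      have := PySem.Int.floordiv_mul_add_mod x 10
      omega

theorem pvDigCount_eq_length (x : Int) :
    pvDigCount x = ((pvDigits x).length : Int) := by
  fun_induction pvDigits x with
  | case1 x h => rw [pvDigCount]; simp [h]
  | case2 x h ih =>
      rw [pvDigCount, dif_neg h, ih]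
      simp only [List.length_cons]
      push_cast; ring

theorem pvRevLoop_eq (x : Int) : ∀ inv : Int,
    pvRevLoop x inv = pvVal ((pvDigits x).reverse) + inv * 10 ^ (pvDigits x).length := by
  fun_induction pvDigits x with
  | case1 x h => intro inv; rw [pvRevLoop]; simp [h, pvVal]
  | case2 x h ih =>
      intro inv
      rw [pvRevLoop]
      simp only [h, dite_false, List.reverse_cons, List.length_cons]
      rw [ih, pvVal_append_single]
      simp [List.length_reverse]
      ring

theorem pvCmp_eq_zc (m : Nat) : ∀ (P Q : List Int), pvGood P → pvGood Q →
    pvCmpLoop (m : Int) (pvVal P) (pvVal Q) = pvZc m P Q := by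
  induction m with
  | zero => intro P Q _ _; rw [pvCmpLoop]; simp [pvZc]
  | succ m ih =>
      intro P Q hP hQ
      rw [pvCmpLoop, pvZc]
      have h1 : ¬ ((m : Int) + 1 ≤ 0) := by omega
      push_cast
      rw [if_neg h1, pvVal_mod P hP, pvVal_mod Q hQ,
        pvVal_div P hP, pvVal_div Q hQ]
      have : ((m : Int) + 1 - 1) = (m : Int) := by omega
      rw [this]
      split_ifs with he
      · rfl
      · exact ih P.tail Q.tail (fun d hd => hP d (List.mem_of_mem_tail hd))
          (fun d hd => hQ d (List.mem_of_mem_tail hd))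

-- getElem characterisations of the two heads used by pvTwoPtr
theorem pvHeadD_drop (L : List Int) (t : Nat) (h : t < L.length) :
    (L.drop t).headD 0 = L[t] := by
  have : L.drop t = L[t] :: L.drop (t + 1) := List.drop_eq_getElem_cons h
  rw [this]; rfl

theorem pvTwoPtr_eq_zc : ∀ (m t : Nat) (ds : List Int), 2 * t ≤ ds.length →
    m = (ds.length - 2 * t) / 2 →
    pvTwoPtr ds (t : Int) ((ds.length : Int) - 1 - (t : Int)) =
      pvZc m (ds.drop t) (ds.reverse.drop t) := by
  intro m
  induction m with
  | zero =>
      intro t ds h1 h2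
      rw [pvTwoPtr]
      have : (ds.length : Int) - 1 - (t : Int) ≤ (t : Int) := by omega
      rw [if_pos this]; simp [pvZc]
  | succ m ih =>
      intro t ds h1 h2
      have hlen : 2 * t + 2 ≤ ds.length := by omega
      rw [pvTwoPtr, pvZc]
      have hlt : ¬ ((ds.length : Int) - 1 - (t : Int) ≤ (t : Int)) := by omega
      rw [if_neg hlt]
      have ht : t < ds.length := by omega
      have hhi : (ds.length : Int) - 1 - (t : Int) = ((ds.length - 1 - t : Nat) : Int) := by
        omega
      have hhn : ds.length - 1 - t < ds.length := by omega
      have hget1 : (PySem.List.pyGet? ds (t : Int)).getD 0 = ds[t] := by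
        rw [PySem.List.pyGet?_natCast, List.getElem?_eq_getElem ht]; rfl
      have hget2 : (PySem.List.pyGet? ds ((ds.length : Int) - 1 - (t : Int))).getD 0
          = ds[ds.length - 1 - t] := by
        rw [hhi, PySem.List.pyGet?_natCast, List.getElem?_eq_getElem hhn]; rfl
      have hrev : ds.reverse[t]'(by simpa using ht) = ds[ds.length - 1 - t] := by
        rw [List.getElem_reverse]
      rw [hget1, hget2]
      rw [pvHeadD_drop ds t ht, pvHeadD_drop ds.reverse t (by simpa using ht), hrev]
      split_ifs with he
      · rfl
      · have h3 : ((t : Int) + 1) = ((t + 1 : Nat) : Int) := by push_cast; ring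
        have h4 : (ds.length : Int) - 1 - (t : Int) - 1
            = (ds.length : Int) - 1 - ((t + 1 : Nat) : Int) := by push_cast; ring
        rw [h3, h4, ih (t + 1) ds (by omega) (by omega)]
        congr 1
        · rw [List.tail_drop]
        · rw [List.tail_drop]

theorem pvCount_halved (k : Nat) :
    PySem.Int.floordiv (k : Int) 2 = ((k / 2 : Nat) : Int) := by
  exact_mod_cast PySem.Int.floordiv_natCast k 2

-- ===== VERDICT (by name: the statement is the Claim_ definition above) =====
theorem is_antipalindrome_spec : Claim_equal_is_antipalindrome := by
  intro n _ hpre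
  unfold Spec_is_antipalindrome is_antipalindrome
  have hgood : pvGood (pvDigits n) := pvGood_digits n
  have hgoodr : pvGood (pvDigits n).reverse := by
    intro d hd; exact hgood d (List.mem_reverse.mp hd)
  have hval : pvVal (pvDigits n) = n := pvVal_digits n hpre
  have hrev : pvRevLoop n 0 = pvVal ((pvDigits n).reverse) := by
    rw [pvRevLoop_eq]; ring
  have hA := pvCmp_eq_zc ((pvDigits n).length / 2) (pvDigits n) (pvDigits n).reverse hgood hgoodr
  rw [hval] at hA
  have hB := pvTwoPtr_eq_zc ((pvDigits n).length / 2) 0 (pvDigits n) (by omega) (by omega)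
  simp only [Nat.cast_zero, sub_zero, List.drop_zero] at hB
  show pvCmpLoop (PySem.Int.floordiv (pvDigCount n) 2) n (pvRevLoop n 0)
      = pvTwoPtr (pvDigits n) 0 ((pvDigits n).length - 1)
  rw [pvDigCount_eq_length, pvCount_halved, hrev, hA, ← hB]
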